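-- pv_equiv track=rewrite | github.com/karlahrnndz/ar-medium | ar1.py | interleave_cumsum
-- ===== SOURCE A (Python) =====
-- def interleave_cumsum(lst, s):
--     result_list = []
--     cumulative_sums = {}
--
--     for i, value in enumerate(lst):
--         floor = i % s
--         cumulative_sums[floor] = cumulative_sums.get(floor, 0) + value
--         result_list.append(cumulative_sums[floor])
--
--     return result_list
-- ===== SOURCE B (Python) =====
-- def interleave_cumsum(lst, s):
--     # Two staged passes instead of A's single stateful pass: first bucket the
--     # indices by residue class i % s, then accumulate each bucket on its own
--     # into a preallocated result list.
--     groups = {}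
--     for i in range(len(lst)):
--         groups.setdefault(i % s, []).append(i)
--     result = [0] * len(lst)
--     for positions in groups.values():
--         total = 0
--         for p in positions:
--             total += lst[p]
--             result[p] = total
--     return result
-- ===== Notes on version B (the rewrite author's own statement) =====
-- stated objective: alternative
-- what changed: Replaces A's single pass with a running-sums dictionary by a two-stage bucket-then-accumulate algorithm: bucket the indices by residue class i % s into position lists, then walk each bucket independently writing running totals into a preallocated result list.
import Mathlib
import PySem

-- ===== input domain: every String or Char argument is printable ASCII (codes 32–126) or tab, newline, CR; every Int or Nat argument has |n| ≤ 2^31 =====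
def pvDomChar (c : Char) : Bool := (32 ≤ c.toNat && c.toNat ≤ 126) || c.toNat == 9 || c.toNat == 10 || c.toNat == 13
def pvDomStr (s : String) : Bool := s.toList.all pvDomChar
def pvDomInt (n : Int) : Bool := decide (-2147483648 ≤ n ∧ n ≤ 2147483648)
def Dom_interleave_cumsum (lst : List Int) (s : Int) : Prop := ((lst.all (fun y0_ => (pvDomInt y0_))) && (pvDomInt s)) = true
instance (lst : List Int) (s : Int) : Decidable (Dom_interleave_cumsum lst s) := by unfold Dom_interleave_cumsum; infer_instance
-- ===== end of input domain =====

-- B replaces A's single stateful pass (a dictionary of per-residue running sums read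
-- back at every element) by a two-stage algorithm: bucket the indices by residue
-- class i % s into position lists, then accumulate each bucket independently into a
-- preallocated result (objective: alternative — same O(n) cost, different structure).

-- ===== PORT A =====
def pvStepA (s : Int) (st : List Int × PySem.Dict Int Int) (p : Int × Int) :
    List Int × PySem.Dict Int Int :=
  let floor := PySem.Int.mod p.1 s
  let d := st.2.insert floor (st.2.getD floor 0 + p.2)
  (st.1 ++ [d.getD floor 0], d)

def interleave_cumsum (lst : List Int) (s : Int) : List Int :=
  ((PySem.List.enumerate lst).foldl (pvStepA s) ([], PySem.Dict.empty)).1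

-- ===== PORT B =====
-- 'groups.setdefault(i % s, []).append(i)' is exactly d[i % s] = d.get(i % s, []) + [i],
-- i.e. Dict.modify; the indices of range(len(lst)) are the Nats of List.range.
def pvGroups (n : Nat) (s : Int) : PySem.Dict Int (List Nat) :=
  (List.range n).foldl
    (fun d (i : Nat) => d.modify (PySem.Int.mod (i : Int) s) [] (fun L => L ++ [i]))
    PySem.Dict.empty

-- 'total += lst[p]; result[p] = total' — every stored position p is a valid index of
-- lst and result, so getD's default and set's out-of-range no-op are never reached.
def pvWrite (lst : List Int) (st : List Int × Int) (p : Nat) : List Int × Int :=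
  let total := st.2 + lst.getD p 0
  (st.1.set p total, total)

def interleave_cumsum_alt (lst : List Int) (s : Int) : List Int :=
  ((pvGroups lst.length s).values).foldl
    (fun res P => (P.foldl (pvWrite lst) (res, 0)).1)
    (List.replicate lst.length 0)

-- ===== PRECONDITION & SPEC =====
-- Pre_ excludes only s = 0 with a non-empty list, where Python A raises
-- ZeroDivisionError (B raises it there too): no input on which A returns is excluded.
def Pre_interleave_cumsum (lst : List Int) (s : Int) : Prop := lst = [] ∨ s ≠ 0
instance (lst : List Int) (s : Int) : Decidable (Pre_interleave_cumsum lst s) := by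
  unfold Pre_interleave_cumsum; infer_instance

def pvWitness_interleave_cumsum : List Int × Int := ([1, 2, 3, 4, 5], 2)

def Spec_interleave_cumsum (lst : List Int) (s : Int) (out : List Int) : Prop :=
  out = interleave_cumsum_alt lst s
instance (lst : List Int) (s : Int) (out : List Int) :
    Decidable (Spec_interleave_cumsum lst s out) := by
  unfold Spec_interleave_cumsum; infer_instance

-- ===== CLAIM (what is proved, stated in full; the proofs are below) =====
def Claim_equal_interleave_cumsum : Prop :=
  ∀ (lst : List Int) (s : Int), Dom_interleave_cumsum lst s →
    Pre_interleave_cumsum lst s →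
    Spec_interleave_cumsum lst s (interleave_cumsum lst s)

-- ===== LEMMAS AND PROOFS =====

-- The residue key of index i, and the common specification: out[i] is the sum of
-- lst[j] over the j ≤ i in i's residue class.
def pvKey (s : Int) (i : Nat) : Int := PySem.Int.mod (i : Int) s

def pvS (lst : List Int) (s : Int) (i : Nat) : Int :=
  (((List.range (i + 1)).filter (fun j => pvKey s j == pvKey s i)).map
    (fun j => lst.getD j 0)).sum

def pvSpecOut (lst : List Int) (s : Int) : List Int :=
  (List.range lst.length).map (pvS lst s)

def pvSumAll (lst : List Int) (s : Int) (r : Int) : Int :=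
  (((List.range lst.length).filter (fun j => pvKey s j == r)).map
    (fun j => lst.getD j 0)).sum

-- pvS only reads indices ≤ i, so it is stable under appending past them.
lemma pvS_append (lst : List Int) (x s : Int) (i : Nat) (h : i < lst.length) :
    pvS (lst ++ [x]) s i = pvS lst s i := by
  unfold pvS
  apply congrArg
  apply List.map_congr_left
  intro j hj
  have hj' : j < i + 1 := List.mem_range.mp (List.mem_filter.mp hj).1
  exact List.getD_append lst [x] 0 j (by omega)

lemma pvS_last (lst : List Int) (x s : Int) :
    pvS (lst ++ [x]) s lst.length = pvSumAll lst s (pvKey s lst.length) + x := by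
  unfold pvS pvSumAll
  rw [List.range_succ, List.filter_append, List.map_append, List.sum_append]
  simp only [List.filter_cons, List.filter_nil, beq_self_eq_true, if_pos]
  have h1 : ((List.range lst.length).filter
      (fun j => pvKey s j == pvKey s lst.length)).map (fun j => (lst ++ [x]).getD j 0)
      = ((List.range lst.length).filter
      (fun j => pvKey s j == pvKey s lst.length)).map (fun j => lst.getD j 0) := by
    apply List.map_congr_left
    intro j hj
    have hj' : j < lst.length := List.mem_range.mp (List.mem_filter.mp hj).1
    exact List.getD_append lst [x] 0 j hj'
  rw [h1]
  simp

lemma pvSumAll_append (lst : List Int) (x s r : Int) :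
    pvSumAll (lst ++ [x]) s r
      = pvSumAll lst s r + (if pvKey s lst.length == r then x else 0) := by
  unfold pvSumAll
  simp only [List.length_append, List.length_singleton]
  rw [List.range_succ, List.filter_append, List.map_append, List.sum_append]
  have h1 : ((List.range lst.length).filter (fun j => pvKey s j == r)).map
      (fun j => (lst ++ [x]).getD j 0)
      = ((List.range lst.length).filter (fun j => pvKey s j == r)).map
      (fun j => lst.getD j 0) := by
    apply List.map_congr_left
    intro j hj
    have hj' : j < lst.length := List.mem_range.mp (List.mem_filter.mp hj).1
    exact List.getD_append lst [x] 0 j hj'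
  rw [h1]
  by_cases hc : pvKey s lst.length == r
  · simp [hc]
  · simp [hc]

-- A's fold, characterised: the output is pvSpecOut and the dict holds pvSumAll.
lemma pvA_char (s : Int) (lst : List Int) :
    ((PySem.List.enumerate lst).foldl (pvStepA s) ([], PySem.Dict.empty)).1
        = pvSpecOut lst s ∧
      ∀ r : Int, ((PySem.List.enumerate lst).foldl (pvStepA s)
        ([], PySem.Dict.empty)).2.getD r 0 = pvSumAll lst s r := by
  induction lst using List.reverseRecOn with
  | nil =>
    constructor
    · simp [PySem.List.enumerate_nil, pvSpecOut]
    · intro r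
      simp [PySem.List.enumerate_nil, pvSumAll, PySem.Dict.getD_empty]
  | append_singleton t x ih =>
    obtain ⟨ih1, ih2⟩ := ih
    rw [PySem.List.enumerate_append, List.foldl_append]
    simp only [PySem.List.enumerate_cons, PySem.List.enumerate_nil, List.foldl_cons,
      List.foldl_nil]
    set st := (PySem.List.enumerate t 0).foldl (pvStepA s) ([], PySem.Dict.empty) with hst
    have hstep : pvStepA s st ((0 + t.length : Int), x)
        = (st.1 ++ [pvSumAll t s (pvKey s t.length) + x],
           st.2.insert (pvKey s t.length) (pvSumAll t s (pvKey s t.length) + x)) := by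
      simp only [pvStepA, zero_add, pvKey, ih2, PySem.Dict.getD_insert_self]
    rw [hstep]
    constructor
    · show st.1 ++ _ = _
      rw [ih1]
      unfold pvSpecOut
      simp only [List.length_append, List.length_singleton]
      rw [List.range_succ, List.map_append, List.map_singleton]
      congr 1
      · apply List.map_congr_left
        intro i hi
        exact (pvS_append t x s i (List.mem_range.mp hi)).symm
      · rw [pvS_last]
    · intro r
      show (st.2.insert _ _).getD r 0 = _
      rw [PySem.Dict.getD_insert, pvSumAll_append, ih2]
      by_cases hc : r = pvKey s t.length
      · simp [hc]
      · have hb : (pvKey s t.length == r) = false := by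
          simp only [beq_eq_false_iff_ne, ne_eq]
          exact fun h => hc h.symm
        simp [hc, hb]

-- B stage 1: the bucket of residue r is exactly the filtered index range.
lemma pvGroups_getD (n : Nat) (s r : Int) :
    (pvGroups n s).getD r [] = (List.range n).filter (fun i => pvKey s i == r) := by
  unfold pvGroups
  have h : (List.range n).foldl
      (fun d (i : Nat) => d.modify (PySem.Int.mod (i : Int) s) [] (fun L => L ++ [i]))
    PySem.Dict.empty
      = ((List.range n).map (fun i => (pvKey s i, i))).foldl
      (fun d p => d.modify p.1 [] (fun L => L ++ [p.2])) PySem.Dict.empty := by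
    rw [List.foldl_map]
    rfl
  rw [h, PySem.Dict.getD_foldl_modify_append, PySem.Dict.getD_empty, List.nil_append,
    List.filter_map, List.map_map]
  simp [Function.comp_def]

lemma pvGroups_keys (n : Nat) (s : Int) :
    (pvGroups n s).keys = PySem.Set.ofList ((List.range n).map (pvKey s)) := by
  unfold pvGroups
  rw [PySem.Dict.keys_foldl_modify_key]
  simp only [PySem.Dict.keys_empty, PySem.Set.update, PySem.Set.ofList_eq_foldl]
  rfl

lemma pvGroups_nodup_keys (n : Nat) (s : Int) : (pvGroups n s).keys.Nodup := by
  unfold pvGroups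
  exact PySem.Dict.nodup_keys_foldl_modify_key _ _ _ _ _ PySem.Dict.nodup_keys_empty

-- The running total written at position i: the lst-values of the bucket entries
-- strictly before i, plus lst[i].
def pvPref (lst : List Int) (P : List Nat) (i : Nat) : Int :=
  ((P.takeWhile (fun q => q != i)).map (fun q => lst.getD q 0)).sum + lst.getD i 0

-- One bucket's inner loop, characterised position by position.
lemma pvWrite_char (lst : List Int) (P : List Nat) :
    ∀ (res : List Int) (t : Int), P.Nodup → (∀ p ∈ P, p < res.length) →
      ((P.foldl (pvWrite lst) (res, t)).1.length = res.length ∧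
       ∀ i : Nat, (P.foldl (pvWrite lst) (res, t)).1[i]? =
         if i ∈ P then some (t + pvPref lst P i) else res[i]?) := by
  induction P with
  | nil => intro res t _ _; simp
  | cons p P' ih =>
    intro res t hnd hlt
    have hp : p < res.length := hlt p (by simp)
    have hnd' : P'.Nodup := (List.nodup_cons.mp hnd).2
    have hpni : p ∉ P' := (List.nodup_cons.mp hnd).1
    simp only [List.foldl_cons]
    have hstep : pvWrite lst (res, t) p
        = (res.set p (t + lst.getD p 0), t + lst.getD p 0) := rfl
    rw [hstep]
    obtain ⟨ihlen, ihget⟩ := ih (res.set p (t + lst.getD p 0)) (t + lst.getD p 0) hnd'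
      (by intro q hq; rw [List.length_set]; exact hlt q (by simp [hq]))
    constructor
    · rw [ihlen, List.length_set]
    · intro i
      rw [ihget i]
      by_cases hip : i = p
      · subst hip
        rw [if_neg hpni, if_pos (List.mem_cons_self), List.getElem?_set_self hp]
        unfold pvPref
        rw [List.takeWhile_cons]
        simp
      · have hpb : (p != i) = true := bne_iff_ne.mpr (Ne.symm hip)
        have hpref : pvPref lst (p :: P') i
            = lst.getD p 0 + pvPref lst P' i := by
          unfold pvPref
          rw [List.takeWhile_cons, if_pos hpb]
          simp only [List.map_cons, List.sum_cons]
          ring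
        by_cases hiP : i ∈ P'
        · rw [if_pos hiP, if_pos (by simp [hiP]), hpref]
          congr 1
          ring
        · rw [if_neg hiP, if_neg (by simp [hip, hiP]),
            List.getElem?_set_ne (Ne.symm hip)]

lemma pvBucket_mem (n : Nat) (s r : Int) (i : Nat) :
    i ∈ (List.range n).filter (fun j => pvKey s j == r) ↔ i < n ∧ pvKey s i = r := by
  simp [List.mem_filter, List.mem_range]

-- In i's own bucket, the entries before i are exactly its class below i, so the
-- running total written at i is pvS.
lemma pvPref_bucket (lst : List Int) (n : Nat) (s : Int) (i : Nat) (hin : i < n) :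
    pvPref lst ((List.range n).filter (fun j => pvKey s j == pvKey s i)) i
      = pvS lst s i := by
  obtain ⟨m, rfl⟩ : ∃ m, n = (i + 1) + m := ⟨n - (i + 1), by omega⟩
  rw [List.range_add, List.filter_append, List.range_succ, List.filter_append]
  have hsing : [i].filter (fun j => pvKey s j == pvKey s i) = [i] := by simp
  rw [hsing]
  unfold pvPref
  rw [List.append_assoc, List.takeWhile_append_of_pos (by
    intro x hx
    have : x < i := List.mem_range.mp (List.mem_filter.mp hx).1
    exact bne_iff_ne.mpr (by omega))]
  rw [List.singleton_append, List.takeWhile_cons]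
  simp only [bne_self_eq_false, if_neg Bool.false_ne_true, List.append_nil]
  unfold pvS
  rw [List.range_succ, List.filter_append, hsing, List.map_append, List.sum_append]
  simp

-- B stage 2: folding the buckets of the residues R writes pvS at every index whose
-- residue is in R and leaves everything else alone.
lemma pvOuter (lst : List Int) (s : Int) :
    ∀ (R : List Int) (res : List Int), res.length = lst.length →
      (((R.map (fun r => (List.range lst.length).filter (fun i => pvKey s i == r))).foldl
          (fun res P => (P.foldl (pvWrite lst) (res, 0)).1) res).length = lst.length ∧
       ∀ i : Nat,
         ((R.map (fun r => (List.range lst.length).filter (fun i => pvKey s i == r))).foldl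
          (fun res P => (P.foldl (pvWrite lst) (res, 0)).1) res)[i]? =
         if i < lst.length ∧ pvKey s i ∈ R then some (pvS lst s i) else res[i]?) := by
  intro R
  induction R with
  | nil =>
    intro res hlen
    refine ⟨by simpa, ?_⟩
    intro i
    simp
  | cons r R' ih =>
    intro res hlen
    simp only [List.map_cons, List.foldl_cons]
    obtain ⟨wl, wg⟩ := pvWrite_char lst
      ((List.range lst.length).filter (fun i => pvKey s i == r)) res 0
      ((List.nodup_range).filter _)
      (by
        intro q hq
        rw [hlen]
        exact ((pvBucket_mem lst.length s r q).mp hq).1)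
    obtain ⟨ihl, ihg⟩ := ih
      ((((List.range lst.length).filter (fun i => pvKey s i == r)).foldl
        (pvWrite lst) (res, 0)).1) (by rw [wl, hlen])
    refine ⟨ihl, ?_⟩
    intro i
    rw [ihg i]
    by_cases h1 : i < lst.length ∧ pvKey s i ∈ R'
    · rw [if_pos h1, if_pos ⟨h1.1, List.mem_cons_of_mem r h1.2⟩]
    · rw [if_neg h1, wg i]
      by_cases h2 : i ∈ (List.range lst.length).filter (fun j => pvKey s j == r)
      · have hm := (pvBucket_mem lst.length s r i).mp h2
        rw [if_pos h2, if_pos ⟨hm.1, by rw [hm.2]; exact List.mem_cons_self⟩]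
        have hp := pvPref_bucket lst lst.length s i hm.1
        rw [hm.2] at hp
        rw [zero_add, hp]
      · rw [if_neg h2, if_neg (by
          rintro ⟨hi, hmem⟩
          rcases List.mem_cons.mp hmem with hr | hR'
          · exact h2 ((pvBucket_mem lst.length s r i).mpr ⟨hi, hr⟩)
          · exact h1 ⟨hi, hR'⟩)]

lemma pvB_char (lst : List Int) (s : Int) :
    interleave_cumsum_alt lst s = pvSpecOut lst s := by
  unfold interleave_cumsum_alt
  have hvals : (pvGroups lst.length s).values
      = (PySem.Set.ofList ((List.range lst.length).map (pvKey s))).map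
          (fun r => (List.range lst.length).filter (fun i => pvKey s i == r)) := by
    rw [PySem.Dict.values_eq_map_keys _ (pvGroups_nodup_keys _ _) [], pvGroups_keys]
    apply List.map_congr_left
    intro r _
    exact pvGroups_getD _ _ _
  rw [hvals]
  obtain ⟨hl, hg⟩ := pvOuter lst s
    (PySem.Set.ofList ((List.range lst.length).map (pvKey s)))
    (List.replicate lst.length 0) (List.length_replicate)
  apply List.ext_getElem?
  intro i
  rw [hg i]
  by_cases hi : i < lst.length
  · have hkm : pvKey s i ∈ PySem.Set.ofList ((List.range lst.length).map (pvKey s)) := by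
      rw [PySem.Set.mem_ofList]
      exact List.mem_map_of_mem (List.mem_range.mpr hi)
    rw [if_pos ⟨hi, hkm⟩]
    unfold pvSpecOut
    simp [hi]
  · rw [if_neg (by tauto)]
    unfold pvSpecOut
    rw [List.getElem?_eq_none (by simpa using hi),
      List.getElem?_eq_none (by simpa using hi)]

-- ===== VERDICT (by name: the statement is the Claim_ definition above) =====
theorem interleave_cumsum_spec : Claim_equal_interleave_cumsum := by
  intro lst s _ _
  show interleave_cumsum lst s = interleave_cumsum_alt lst s
  rw [pvB_char]
  exact (pvA_char s lst).1
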